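-- pv_equiv track=rewrite | github.com/dossa328/SkylineOperatorAlgorithmCode | Naive1.py | dominated
-- ===== SOURCE A (Python) =====
-- def dominated(looser, winner):
--     dim = len(looser)
--
--     # as good or better in all dimensions
--     for i in range(dim):
--         if winner[i] > looser[i]:
--             return False
--
--     # better in at least one dimension
--     for i in range(dim):
--         if winner[i] < looser[i]:
--             return True
--
--     return False
-- ===== SOURCE B (Python) =====
-- def dominated(looser, winner):
--     strict = False
--     for i in range(len(looser)):
--         if winner[i] > looser[i]:
--             return False
--         if winner[i] < looser[i]:
--             strict = True
--     return strict
-- ===== Notes on version B (the rewrite author's own statement) =====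
-- stated objective: simpler
-- what changed: Replaced A's two sequential index scans with a single pass over the indices carrying a boolean 'strict' accumulator (early False on a worse dimension, flag set on a strictly better one).
import Mathlib
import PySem

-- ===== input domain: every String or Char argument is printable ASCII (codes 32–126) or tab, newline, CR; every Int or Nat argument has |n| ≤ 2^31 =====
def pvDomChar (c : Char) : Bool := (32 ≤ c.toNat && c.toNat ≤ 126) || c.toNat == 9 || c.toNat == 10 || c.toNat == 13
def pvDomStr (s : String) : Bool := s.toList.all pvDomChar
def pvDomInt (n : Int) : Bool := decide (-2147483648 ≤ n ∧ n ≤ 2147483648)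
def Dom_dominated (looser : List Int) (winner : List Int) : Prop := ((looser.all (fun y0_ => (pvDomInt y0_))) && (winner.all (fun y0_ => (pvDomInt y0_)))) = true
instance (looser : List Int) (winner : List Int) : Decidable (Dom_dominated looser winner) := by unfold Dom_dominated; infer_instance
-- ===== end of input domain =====

-- B replaces A's two sequential scans with one pass carrying a boolean 'strict' accumulator (simpler: one loop instead of two).

-- ===== PORT A =====
-- A: first scan returns False at the first index with winner[i] > looser[i] (an early-exit
-- scan ↦ List.any over range(dim)); otherwise a second scan returns True at the first index
-- with winner[i] < looser[i]; otherwise False. Under Pre_ every index read is in range, so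
-- getD is exact for the Python indexing.
def dominated (looser : List Int) (winner : List Int) : Bool :=
  let dim := looser.length
  if (List.range dim).any (fun i => winner.getD i 0 > looser.getD i 0) then false
  else if (List.range dim).any (fun i => winner.getD i 0 < looser.getD i 0) then true
  else false

-- ===== PORT B =====
-- B's single loop over the indices with the 'strict' accumulator, as in Source B.
def dominatedAltLoop (looser : List Int) (winner : List Int) (strict : Bool) : List Nat → Bool
  | [] => strict
  | i :: rest =>
      if winner.getD i 0 > looser.getD i 0 then false
      else dominatedAltLoop looser winner (strict || decide (winner.getD i 0 < looser.getD i 0)) rest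

def dominated_alt (looser : List Int) (winner : List Int) : Bool :=
  dominatedAltLoop looser winner false (List.range looser.length)

-- ===== PRECONDITION & SPEC =====
-- Pre_ excludes exactly the inputs on which the Python A raises IndexError: winner shorter than
-- looser and no index of winner where winner strictly exceeds looser fires the early return first.
def Pre_dominated (looser : List Int) (winner : List Int) : Prop :=
  looser.length ≤ winner.length ∨
  (List.range winner.length).any (fun i => winner.getD i 0 > looser.getD i 0) = true
instance (looser : List Int) (winner : List Int) : Decidable (Pre_dominated looser winner) := by unfold Pre_dominated; infer_instance

def pvWitness_dominated : List Int × List Int := ([3, 4], [1, 4])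

def Spec_dominated (looser : List Int) (winner : List Int) (out : Bool) : Prop := out = dominated_alt looser winner
instance (looser : List Int) (winner : List Int) (out : Bool) : Decidable (Spec_dominated looser winner out) := by unfold Spec_dominated; infer_instance

-- ===== CLAIM (what is proved, stated in full; the proofs are below) =====
def Claim_equal_dominated : Prop := ∀ (looser : List Int) (winner : List Int), Dom_dominated looser winner → Pre_dominated looser winner → Spec_dominated looser winner (dominated looser winner)

-- ===== LEMMAS AND PROOFS =====
lemma dominatedAltLoop_eq (looser winner : List Int) (strict : Bool) (l : List Nat) :
    dominatedAltLoop looser winner strict l =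
      if l.any (fun i => winner.getD i 0 > looser.getD i 0) then false
      else (strict || l.any (fun i => winner.getD i 0 < looser.getD i 0)) := by
  induction l generalizing strict with
  | nil => simp [dominatedAltLoop]
  | cons i rest ih =>
      by_cases h : winner.getD i 0 > looser.getD i 0
      · have h' : looser[i]?.getD 0 < winner[i]?.getD 0 := h
        simp [dominatedAltLoop, h']
      · have h' : ¬ looser[i]?.getD 0 < winner[i]?.getD 0 := h
        simp only [dominatedAltLoop, if_neg h, ih, List.any_cons]
        simp [h', Bool.or_assoc]

-- ===== VERDICT (by name: the statement is the Claim_ definition above) =====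
theorem dominated_spec : Claim_equal_dominated := by
  intro looser winner _ _
  unfold Spec_dominated dominated dominated_alt
  show (if ((List.range looser.length).any fun i => decide (winner.getD i 0 > looser.getD i 0)) = true then false
        else if ((List.range looser.length).any fun i => decide (winner.getD i 0 < looser.getD i 0)) = true then true
        else false)
      = dominatedAltLoop looser winner false (List.range looser.length)
  rw [dominatedAltLoop_eq, Bool.false_or]
  by_cases hc : ((List.range looser.length).any fun i => decide (winner.getD i 0 > looser.getD i 0)) = true
  · rw [if_pos hc, if_pos hc]
  · rw [if_neg hc, if_neg hc]
    cases hd : (List.range looser.length).any fun i => decide (winner.getD i 0 < looser.getD i 0) <;> simp [hd]
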